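-- pv_equiv track=rewrite | github.com/pypi-data/pypi-mirror-71 | packages/admcycles/admcycles-1.1.tar.gz/admcycles-1.1/admcycles/diffstrata/bic.py | _place_legs_on_top
-- ===== SOURCE A (Python) =====
-- def _place_legs_on_top(space,orders_bot):
--     ## iterator distributing n legs with zero orders (determined by their friends on the bottom component)
--     ## onto the top components according to space
--     ## here space is a list of 2g_comp-2-stuff we already placed on each top component
--     ## return a pointlist (numbered according to keys of orders_bot for now...)
--     legal_splits = []
--     distr = [[] for _ in space] # list to hold current distribution
--     # we sort the points by order, as the ones with the highest order are the hardest to place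
--     # note that this is actually reverse sorted, as the top order is -2-bottom order, but this
--     # is good, as we want to manipulate the list from the end
--     ordered_keys = [k for k,v in reversed(sorted(orders_bot.items(), key=lambda o: o[1]))]
--     def splits(keys):
--         # distribute the points (keys) onto spaces
--         if not keys:
--             # done if we hit all components and all spaces are 0
--             if all(distr) and all(s == 0 for s in space):
--                 legal_splits.append([[a for a in c] for c in distr])
--             return
--         else:
--             # check if there are enough points left
--             remaining_comp = len([hit for hit in distr if not hit]) # components that don't have a point yet
--             if remaining_comp > len(keys):
--                 return
--             current = keys.pop()
--             current_order = -2 - orders_bot[current]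
--             # try to place current on all components
--             for i in range(len(space)):
--                 if space[i] >= current_order:
--                     space[i] -= current_order
--                     distr[i].append(current)
--                     splits(keys) # recursion
--                     # undo changes:
--                     space[i] += current_order
--                     distr[i].pop()
--             keys.append(current)
--     # generate splits:
--     splits(ordered_keys)
--     return legal_splits
-- ===== SOURCE B (Python) =====
-- # B: frontier fold (level-by-level expansion of partial states) instead of
-- # recursive backtracking with mutate/undo; same pruning, same output order.
-- def _place_legs_on_top(space, orders_bot):
--     # processing order: ascending bottom order (A reverse-sorts and pops from the end)
--     ordered = [k for k, v in sorted(orders_bot.items(), key=lambda o: o[1])]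
--     states = [(tuple(space), tuple(() for _ in space))]
--     remaining = len(ordered)
--     for key in ordered:
--         o = -2 - orders_bot[key]
--         nxt = []
--         for residues, distr in states:
--             if sum(1 for c in distr if not c) > remaining:
--                 continue
--             for i in range(len(space)):
--                 if residues[i] >= o:
--                     nxt.append((residues[:i] + (residues[i] - o,) + residues[i + 1:],
--                                 distr[:i] + (distr[i] + (key,),) + distr[i + 1:]))
--         states = nxt
--         remaining -= 1
--     return [[list(c) for c in distr] for residues, distr in states
--             if all(distr) and all(r == 0 for r in residues)]
-- ===== Notes on version B (the rewrite author's own statement) =====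
-- stated objective: alternative
-- what changed: Replaces the recursive backtracking with in-place mutate/undo and a shared accumulator by a level-by-level frontier fold: a list of immutable partial states (residues, distribution) is expanded once per key with the same pruning, and the legality filter is applied once at the end.
import Mathlib
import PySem

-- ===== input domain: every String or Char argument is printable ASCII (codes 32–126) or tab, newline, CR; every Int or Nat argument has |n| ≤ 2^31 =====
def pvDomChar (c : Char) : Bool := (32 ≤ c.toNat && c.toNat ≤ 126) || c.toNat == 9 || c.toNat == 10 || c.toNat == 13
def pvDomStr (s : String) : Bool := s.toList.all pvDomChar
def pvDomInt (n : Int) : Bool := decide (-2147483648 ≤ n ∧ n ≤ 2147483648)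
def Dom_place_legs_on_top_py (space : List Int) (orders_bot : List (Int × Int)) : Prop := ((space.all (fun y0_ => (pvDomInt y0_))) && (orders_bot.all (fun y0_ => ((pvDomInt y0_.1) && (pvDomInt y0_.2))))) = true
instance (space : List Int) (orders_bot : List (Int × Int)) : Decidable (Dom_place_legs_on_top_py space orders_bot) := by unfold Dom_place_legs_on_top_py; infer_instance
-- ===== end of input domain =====

-- B replaces A's recursive backtracking (mutate/undo on shared state) by a level-by-level
-- frontier fold over immutable partial states; same pruning and output order ("alternative").
-- A temporarily mutates its `space` argument but restores it before returning.

-- ===== PORT A =====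
-- the inner recursive `splits` of A; `legal` is the accumulated legal_splits (a closure
-- variable in Python); keys are popped from the end; mutate-then-undo on space/distr
-- becomes passing the updated copies into the recursive call.
def pvSplitsA (ob : PySem.Dict Int Int) (space : List Int) (distr : List (List Int))
    (keys : List Int) (legal : List (List (List Int))) : List (List (List Int)) :=
  if hk : keys = [] then
    if (distr.all fun c => !c.isEmpty) && (space.all fun s => s == 0) then
      legal ++ [distr.map (fun c => c.map (fun a => a))]
    else legal
  else
    let remaining_comp := (distr.filter fun hit => hit.isEmpty).length
    if remaining_comp > keys.length then legal
    else
      let current := keys.getLast hk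
      let keys' := keys.dropLast
      let current_order := -2 - ob.getD current 0
      (List.range space.length).foldl (fun acc i =>
        if space.getD i 0 ≥ current_order then
          pvSplitsA ob (space.set i (space.getD i 0 - current_order))
            (distr.set i (distr.getD i [] ++ [current])) keys' acc
        else acc) legal
termination_by keys.length
decreasing_by
  have : keys ≠ [] := hk
  simp only [List.length_dropLast]
  have := List.length_pos_iff.mpr this
  omega

def place_legs_on_top_py (space : List Int) (orders_bot : List (Int × Int)) : List (List (List Int)) :=
  let ob := PySem.Dict.ofList orders_bot
  let distr := space.map (fun _ => ([] : List Int))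
  let ordered_keys := ((PySem.List.sorted ob.items (fun o => o.2) false).reverse).map (fun kv => kv.1)
  pvSplitsA ob space distr ordered_keys []

-- ===== PORT B =====
-- expand the frontier once for `key`; `remaining` counts keys not yet placed (incl. `key`)
def pvStepB (ob : PySem.Dict Int Int) (n : Nat) (remaining : Int) (key : Int)
    (states : List (List Int × List (List Int))) : List (List Int × List (List Int)) :=
  let o := -2 - ob.getD key 0
  states.foldl (fun nxt st =>
    if ((st.2.filter fun c => c.isEmpty).length : Int) > remaining then nxt
    else (List.range n).foldl (fun nxt2 i =>
      if st.1.getD i 0 ≥ o then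
        nxt2 ++ [(st.1.set i (st.1.getD i 0 - o), st.2.set i (st.2.getD i [] ++ [key]))]
      else nxt2) nxt) []

-- the `for key in ordered` loop of B
def pvRunB (ob : PySem.Dict Int Int) (n : Nat)
    (states : List (List Int × List (List Int))) (remaining : Int) :
    List Int → List (List Int × List (List Int))
  | [] => states
  | key :: rest => pvRunB ob n (pvStepB ob n remaining key states) (remaining - 1) rest

def place_legs_on_top_py_alt (space : List Int) (orders_bot : List (Int × Int)) : List (List (List Int)) :=
  let ob := PySem.Dict.ofList orders_bot
  let ordered := (PySem.List.sorted ob.items (fun o => o.2) false).map (fun kv => kv.1)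
  let final := pvRunB ob space.length [(space, space.map (fun _ => ([] : List Int)))]
    (ordered.length : Int) ordered
  (final.filter fun st => (st.2.all fun c => !c.isEmpty) && (st.1.all fun s => s == 0)).map
    (fun st => st.2.map (fun c => c.map (fun a => a)))

-- ===== PRECONDITION & SPEC =====
def Spec_place_legs_on_top_py (space : List Int) (orders_bot : List (Int × Int)) (out : List (List (List Int))) : Prop := out = place_legs_on_top_py_alt space orders_bot
instance (space : List Int) (orders_bot : List (Int × Int)) (out : List (List (List Int))) : Decidable (Spec_place_legs_on_top_py space orders_bot out) := by unfold Spec_place_legs_on_top_py; infer_instance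

-- ===== CLAIM (what is proved, stated in full; the proofs are below) =====
def Claim_equal_place_legs_on_top_py : Prop := ∀ (space : List Int) (orders_bot : List (Int × Int)), Dom_place_legs_on_top_py space orders_bot → Spec_place_legs_on_top_py space orders_bot (place_legs_on_top_py space orders_bot)

-- ===== LEMMAS AND PROOFS =====

-- B's final filter-and-extract, as a named function for the proofs
def pvF (states : List (List Int × List (List Int))) : List (List (List Int)) :=
  (states.filter fun st => (st.2.all fun c => !c.isEmpty) && (st.1.all fun s => s == 0)).map
    (fun st => st.2.map (fun c => c.map (fun a => a)))

-- the children one frontier state contributes in one step of B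
def pvContrib (ob : PySem.Dict Int Int) (n : Nat) (remaining : Int) (key : Int)
    (st : List Int × List (List Int)) : List (List Int × List (List Int)) :=
  let o := -2 - ob.getD key 0
  if ((st.2.filter fun c => c.isEmpty).length : Int) > remaining then []
  else (List.range n).foldl (fun nxt2 i =>
    if st.1.getD i 0 ≥ o then
      nxt2 ++ [(st.1.set i (st.1.getD i 0 - o), st.2.set i (st.2.getD i [] ++ [key]))]
    else nxt2) []

lemma pvInnerShift {α β : Type} (P : α → Prop) [DecidablePred P] (f : α → β) :
    ∀ (l : List α) (acc : List β),
    l.foldl (fun a i => if P i then a ++ [f i] else a) acc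
      = acc ++ l.foldl (fun a i => if P i then a ++ [f i] else a) [] := by
  intro l
  induction l with
  | nil => intro acc; simp
  | cons i l ih =>
    intro acc
    simp only [List.foldl_cons]
    rw [ih, ih (if P i then [] ++ [f i] else [])]
    by_cases h : P i <;> simp [h]

lemma pvStepB_flatMap (ob : PySem.Dict Int Int) (n : Nat) (r : Int) (key : Int)
    (states : List (List Int × List (List Int))) :
    pvStepB ob n r key states = states.flatMap (pvContrib ob n r key) := by
  unfold pvStepB
  suffices h : ∀ (ss : List (List Int × List (List Int))) (acc : List (List Int × List (List Int))),
      ss.foldl (fun nxt st =>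
        if ((st.2.filter fun c => c.isEmpty).length : Int) > r then nxt
        else (List.range n).foldl (fun nxt2 i =>
          if st.1.getD i 0 ≥ (-2 - ob.getD key 0) then
            nxt2 ++ [(st.1.set i (st.1.getD i 0 - (-2 - ob.getD key 0)),
                      st.2.set i (st.2.getD i [] ++ [key]))]
          else nxt2) nxt) acc = acc ++ ss.flatMap (pvContrib ob n r key) by
    simpa using h states []
  intro ss
  induction ss with
  | nil => intro acc; simp
  | cons st ss ih =>
    intro acc
    simp only [List.foldl_cons, List.flatMap_cons]
    rw [ih]
    by_cases h : ((st.2.filter fun c => c.isEmpty).length : Int) > r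
    · simp [pvContrib, h]
    · rw [pvInnerShift (fun i => st.1.getD i 0 ≥ (-2 - ob.getD key 0))]
      simp [pvContrib, h]

lemma pvRunB_nil (ob : PySem.Dict Int Int) (n : Nat) :
    ∀ (fwd : List Int) (r : Int), pvRunB ob n [] r fwd = [] := by
  intro fwd
  induction fwd with
  | nil => intro r; rfl
  | cons k rest ih =>
    intro r
    show pvRunB ob n (pvStepB ob n r k []) (r - 1) rest = []
    rw [pvStepB_flatMap]
    simpa using ih (r - 1)

lemma pvRunB_append (ob : PySem.Dict Int Int) (n : Nat) :
    ∀ (fwd : List Int) (s1 s2 : List (List Int × List (List Int))) (r : Int),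
    pvRunB ob n (s1 ++ s2) r fwd = pvRunB ob n s1 r fwd ++ pvRunB ob n s2 r fwd := by
  intro fwd
  induction fwd with
  | nil => intro s1 s2 r; rfl
  | cons k rest ih =>
    intro s1 s2 r
    show pvRunB ob n (pvStepB ob n r k (s1 ++ s2)) (r - 1) rest = _
    rw [pvStepB_flatMap, List.flatMap_append, ← pvStepB_flatMap, ← pvStepB_flatMap, ih]
    rfl

lemma pvF_append (s1 s2 : List (List Int × List (List Int))) :
    pvF (s1 ++ s2) = pvF s1 ++ pvF s2 := by
  simp [pvF]

lemma pvExpand (ob : PySem.Dict Int Int) (n : Nat) (rest : List Int)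
    (P : Nat → Prop) [DecidablePred P] (child : Nat → List Int × List (List Int)) :
    ∀ (l : List Nat) (acc : List (List (List Int))),
    l.foldl (fun acc i => if P i then acc ++ pvF (pvRunB ob n [child i] (rest.length : Int) rest) else acc) acc
      = acc ++ pvF (pvRunB ob n (l.foldl (fun a i => if P i then a ++ [child i] else a) []) (rest.length : Int) rest) := by
  intro l
  induction l with
  | nil => intro acc; simp [pvRunB_nil, pvF]
  | cons i l ih =>
    intro acc
    simp only [List.foldl_cons]
    by_cases h : P i
    · simp only [if_pos h]
      rw [ih _, pvInnerShift P child l ([] ++ [child i]), List.nil_append,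
        pvRunB_append, pvF_append, List.append_assoc]
    · simp only [if_neg h]
      exact ih _

lemma pvMain (ob : PySem.Dict Int Int) :
    ∀ (fwd : List Int) (space : List Int) (distr : List (List Int)) (legal : List (List (List Int))),
    pvSplitsA ob space distr fwd.reverse legal
      = legal ++ pvF (pvRunB ob space.length [(space, distr)] (fwd.length : Int) fwd) := by
  intro fwd
  induction fwd with
  | nil =>
    intro space distr legal
    show pvSplitsA ob space distr [] legal = legal ++ pvF [(space, distr)]
    rw [pvSplitsA]
    simp only [pvF, List.filter]
    by_cases h : ((distr.all fun c => !c.isEmpty) && (space.all fun s => s == 0)) = true <;>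
      simp [h]
  | cons k rest ih =>
    intro space distr legal
    have hne : rest.reverse ++ [k] ≠ [] := by simp
    rw [List.reverse_cons, pvSplitsA, dif_neg hne]
    have hlast : (rest.reverse ++ [k]).getLast hne = k := by
      simp
    have hdrop : (rest.reverse ++ [k]).dropLast = rest.reverse := by
      simp
    have hlen : (rest.reverse ++ [k]).length = rest.length + 1 := by simp
    rw [hlast, hdrop, hlen]
    show (if (distr.filter fun hit => hit.isEmpty).length > rest.length + 1 then legal else _) = _
    have hrunb : pvRunB ob space.length [(space, distr)] ((k :: rest).length : Int) (k :: rest)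
        = pvRunB ob space.length (pvContrib ob space.length ((k :: rest).length : Int) k (space, distr))
            (((k :: rest).length : Int) - 1) rest := by
      show pvRunB ob space.length (pvStepB ob space.length _ k [(space, distr)]) _ rest = _
      rw [pvStepB_flatMap]
      simp
    have hlc : (k :: rest).length = rest.length + 1 := rfl
    by_cases hp : (distr.filter fun hit => hit.isEmpty).length > rest.length + 1
    · rw [if_pos hp, hrunb]
      have hp' : (distr.filter fun c => c.isEmpty).length > (k :: rest).length := by
        rw [hlc]; exact hp
      have hcond : (((distr.filter fun c => c.isEmpty).length : Int) > (((k :: rest).length : Nat) : Int)) :=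
        by exact_mod_cast hp'
      rw [show pvContrib ob space.length ((k :: rest).length : Int) k (space, distr) = [] by
        simp only [pvContrib]; rw [if_pos hcond]]
      simp [pvRunB_nil, pvF]
    · rw [if_neg hp, hrunb]
      have hp' : ¬ (distr.filter fun c => c.isEmpty).length > (k :: rest).length := by
        rw [hlc]; exact hp
      have hcond : ¬ (((distr.filter fun c => c.isEmpty).length : Int) > (((k :: rest).length : Nat) : Int)) :=
        fun h => hp' (by exact_mod_cast h)
      have hcontrib : pvContrib ob space.length ((k :: rest).length : Int) k (space, distr)
          = (List.range space.length).foldl (fun a i =>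
              if space.getD i 0 ≥ (-2 - ob.getD k 0) then
                a ++ [(space.set i (space.getD i 0 - (-2 - ob.getD k 0)),
                       distr.set i (distr.getD i [] ++ [k]))]
              else a) [] := by
        simp only [pvContrib]; rw [if_neg hcond]
      have hrm : (((k :: rest).length : Nat) : Int) - 1 = (rest.length : Int) := by
        simp
      rw [hcontrib, hrm]
      show (List.range space.length).foldl (fun acc i =>
          if space.getD i 0 ≥ (-2 - ob.getD k 0) then
            pvSplitsA ob (space.set i (space.getD i 0 - (-2 - ob.getD k 0)))
              (distr.set i (distr.getD i [] ++ [k])) rest.reverse acc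
          else acc) legal = _
      -- rewrite each recursive call via the induction hypothesis, then fold the structure
      exact (PySem.List.foldl_congr_mem'
        (l := List.range space.length) (init := legal)
        (f := fun acc i => if space.getD i 0 ≥ (-2 - ob.getD k 0) then
            pvSplitsA ob (space.set i (space.getD i 0 - (-2 - ob.getD k 0)))
              (distr.set i (distr.getD i [] ++ [k])) rest.reverse acc
          else acc)
        (g := fun acc i => if space.getD i 0 ≥ (-2 - ob.getD k 0) then
            acc ++ pvF (pvRunB ob space.length
              [(space.set i (space.getD i 0 - (-2 - ob.getD k 0)),
                distr.set i (distr.getD i [] ++ [k]))] (rest.length : Int) rest)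
          else acc)
        (by
          intro i _ acc
          by_cases hi : space.getD i 0 ≥ (-2 - ob.getD k 0)
          · simp only [if_pos hi]
            rw [ih]
            simp
          · simp only [if_neg hi])).trans
        (pvExpand ob space.length rest
          (fun i => space.getD i 0 ≥ (-2 - ob.getD k 0))
          (fun i => (space.set i (space.getD i 0 - (-2 - ob.getD k 0)),
                     distr.set i (distr.getD i [] ++ [k])))
          (List.range space.length) legal)

-- ===== VERDICT (by name: the statement is the Claim_ definition above) =====
theorem place_legs_on_top_py_spec : Claim_equal_place_legs_on_top_py := by
  intro space orders_bot _
  show place_legs_on_top_py space orders_bot = place_legs_on_top_py_alt space orders_bot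
  simp only [place_legs_on_top_py, place_legs_on_top_py_alt]
  rw [List.map_reverse, pvMain]
  simp [pvF]
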